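-- pv_equiv track=rewrite | github.com/GeorgeBeshay/ProblemSolving | CF_Phase_2_2/String/P554B_OhanaCleansUp.py | TheAmazingFunction
-- ===== SOURCE A (Python) =====
-- def TheAmazingFunction(Grid: list):
--     Table = dict()
--     MaxNumOfCommonRows = 0
--     for line in Grid:
--         if Table.get(line) is None:
--             Table.update({line: 1})
--         else:
--             Table.update({line: Table.get(line)+1})
--         if Table.get(line) > MaxNumOfCommonRows:
--             MaxNumOfCommonRows = Table.get(line)
--     return MaxNumOfCommonRows
-- ===== SOURCE B (Python) =====
-- def TheAmazingFunction(Grid: list):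
--     best = 0
--     run = 0
--     prev = None
--     for line in sorted(Grid):
--         if run > 0 and line == prev:
--             run += 1
--         else:
--             run = 1
--         prev = line
--         if run > best:
--             best = run
--     return best
-- ===== Notes on version B (the rewrite author's own statement) =====
-- stated objective: alternative
-- what changed: Sort-then-scan: B sorts the grid and returns the length of the longest run of equal adjacent rows, instead of A's one-pass dict counting with an inline running maximum.
import Mathlib
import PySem

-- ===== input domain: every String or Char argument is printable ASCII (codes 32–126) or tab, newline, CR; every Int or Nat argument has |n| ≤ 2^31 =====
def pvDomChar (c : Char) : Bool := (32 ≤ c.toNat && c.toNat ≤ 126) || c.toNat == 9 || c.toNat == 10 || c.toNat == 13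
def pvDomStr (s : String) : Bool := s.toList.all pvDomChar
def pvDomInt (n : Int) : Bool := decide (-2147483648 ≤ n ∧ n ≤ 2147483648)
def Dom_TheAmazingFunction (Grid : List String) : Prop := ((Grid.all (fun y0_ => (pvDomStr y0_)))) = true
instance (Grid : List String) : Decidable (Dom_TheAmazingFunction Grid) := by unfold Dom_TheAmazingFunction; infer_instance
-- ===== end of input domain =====

-- B replaces A's dict-counting pass (running maximum updated inline) by a different
-- algorithm: sort the grid, then scan the sorted list for the longest run of equal
-- adjacent rows. Objective: alternative (same answer, O(n log n) vs O(n)).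

-- ===== PORT A =====
-- A's loop state is (Table, MaxNumOfCommonRows); each iteration updates the dict and
-- immediately the running maximum, exactly as the Python does.
def TheAmazingFunction (Grid : List String) : Int :=
  (Grid.foldl
    (fun (st : PySem.Dict String Int × Int) line =>
      let t :=
        match st.1.get? line with
        | none => st.1.insert line 1
        | some v => st.1.insert line (v + 1)
      let m :=
        match t.get? line with
        | some v => if v > st.2 then v else st.2
        | none => st.2   -- unreachable: the key was just inserted
      (t, m))
    (PySem.Dict.empty, 0)).2

-- ===== PORT B =====
-- Source B's loop over sorted(Grid) with state (best, run, prev).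
def TheAmazingFunction_alt (Grid : List String) : Int :=
  ((PySem.List.sorted Grid (fun x => x) false).foldl
    (fun (st : Int × Int × Option String) line =>
      let run := if st.2.1 > 0 ∧ some line = st.2.2 then st.2.1 + 1 else 1
      let best := if run > st.1 then run else st.1
      (best, run, some line))
    (0, 0, (none : Option String))).1

-- ===== PRECONDITION & SPEC =====
def Spec_TheAmazingFunction (Grid : List String) (out : Int) : Prop := out = TheAmazingFunction_alt Grid
instance (Grid : List String) (out : Int) : Decidable (Spec_TheAmazingFunction Grid out) := by unfold Spec_TheAmazingFunction; infer_instance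

-- ===== CLAIM (what is proved, stated in full; the proofs are below) =====
def Claim_equal_TheAmazingFunction : Prop := ∀ (Grid : List String), Dom_TheAmazingFunction Grid → Spec_TheAmazingFunction Grid (TheAmazingFunction Grid)

-- ===== LEMMAS AND PROOFS =====

-- The common characterisation: m is the maximal multiplicity in xs (0 on []).
def pvIsMaxCount (xs : List String) (m : Int) : Prop :=
  (∀ k, ((xs.count k : Int)) ≤ m) ∧ (m = 0 ∨ ∃ k ∈ xs, ((xs.count k : Int)) = m)

theorem pv_maxCount_unique (xs : List String) (m m' : Int)
    (h : pvIsMaxCount xs m) (h' : pvIsMaxCount xs m') : m = m' := by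
  obtain ⟨H1, H2⟩ := h
  obtain ⟨H1', H2'⟩ := h'
  rcases H2 with h0 | ⟨k, hk, hkc⟩ <;> rcases H2' with h0' | ⟨k', hk', hkc'⟩
  · omega
  · have := H1 k'
    have h1 : 1 ≤ xs.count k' := List.one_le_count_iff.mpr hk'
    omega
  · have := H1' k
    have h1 : 1 ≤ xs.count k := List.one_le_count_iff.mpr hk
    omega
  · have hle : m ≤ m' := hkc ▸ H1' k
    have hge : m' ≤ m := hkc' ▸ H1 k'
    omega

-- get? on a counter at a key that occurs in the list
theorem pv_get?_counter (q : List String) (x : String) (hx : x ∈ q) :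
    (PySem.Dict.counter q).get? x = some ((q.count x : Int)) := by
  have hc : (PySem.Dict.counter q).contains x = true := by
    rw [PySem.Dict.contains_counter]; simpa using hx
  cases h : (PySem.Dict.counter q).get? x with
  | none =>
      rw [PySem.Dict.get?_eq_none_iff_contains] at h
      simp [h] at hc
  | some v =>
      have := PySem.Dict.getD_counter (xs := q) (v := x)
      rw [PySem.Dict.getD_eq_get?_getD, h] at this
      simp at this
      simp [this]

-- A's loop body, named for the proofs (definitionally the lambda in the port of A)
def pvStepA (st : PySem.Dict String Int × Int) (line : String) : PySem.Dict String Int × Int :=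
  let t :=
    match st.1.get? line with
    | none => st.1.insert line 1
    | some v => st.1.insert line (v + 1)
  let m :=
    match t.get? line with
    | some v => if v > st.2 then v else st.2
    | none => st.2
  (t, m)

-- A's loop invariant: running the loop from (counter p, m) over l, with m the
-- maximal multiplicity of p, yields the maximal multiplicity of p ++ l.
theorem pv_loopA (l : List String) : ∀ (p : List String) (m : Int),
    pvIsMaxCount p m →
    pvIsMaxCount (p ++ l) (l.foldl pvStepA (PySem.Dict.counter p, m)).2 := by
  induction l with
  | nil =>
      intro p m h
      simpa using h
  | cons x t ih =>
      intro p m hmc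
      obtain ⟨H1, H2⟩ := hmc
      have htab :
          (match (PySem.Dict.counter p).get? x with
            | none => (PySem.Dict.counter p).insert x 1
            | some v => (PySem.Dict.counter p).insert x (v + 1))
          = PySem.Dict.counter (p ++ [x]) := by
        rw [PySem.Dict.counter_append_singleton, PySem.Dict.modify]
        cases h : (PySem.Dict.counter p).get? x with
        | none => simp [PySem.Dict.getD_eq_get?_getD, h]
        | some v => simp [PySem.Dict.getD_eq_get?_getD, h]
      have hget : (PySem.Dict.counter (p ++ [x])).get? x
          = some (((p ++ [x]).count x : Int)) :=
        pv_get?_counter _ x (by simp)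
      have hc1 : ((p ++ [x]).count x) = p.count x + 1 := by simp
      have hstep : pvStepA (PySem.Dict.counter p, m) x
          = (PySem.Dict.counter (p ++ [x]),
              if ((p ++ [x]).count x : Int) > m then ((p ++ [x]).count x : Int) else m) := by
        simp only [pvStepA, htab, hget]
      have H1' : ∀ k, (((p ++ [x]).count k : Int))
          ≤ (if ((p ++ [x]).count x : Int) > m then ((p ++ [x]).count x : Int) else m) := by
        intro k
        by_cases hk : k = x
        · subst hk; split <;> omega
        · have hxk : ¬ x = k := fun h => hk h.symm
          have hck : ((p ++ [x]).count k) = p.count k := by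
            simp [List.count_append, hxk]
          have := H1 k
          rw [hck]
          split <;> omega
      have H2' : (if ((p ++ [x]).count x : Int) > m then ((p ++ [x]).count x : Int) else m) = 0
          ∨ ∃ k ∈ p ++ [x], (((p ++ [x]).count k : Int))
              = (if ((p ++ [x]).count x : Int) > m then ((p ++ [x]).count x : Int) else m) := by
        split
        · exact Or.inr ⟨x, by simp, rfl⟩
        · rename_i hle
          rcases H2 with h0 | ⟨k, hk, hkc⟩
          · exfalso
            rw [h0] at hle
            omega
          · refine Or.inr ⟨k, by simp [hk], ?_⟩
            have hkx : k ≠ x := by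
              intro he
              subst he
              rw [hc1] at hle
              omega
            have hxk : ¬ x = k := fun h => hkx h.symm
            have : ((p ++ [x]).count k) = p.count k := by
              simp [List.count_append, hxk]
            rw [this, hkc]
      rw [List.foldl_cons, hstep]
      have := ih (p ++ [x]) _ ⟨H1', H2'⟩
      simpa using this

-- B's loop body, named for the proofs
def pvStepB (st : Int × Int × Option String) (line : String) : Int × Int × Option String :=
  let run := if st.2.1 > 0 ∧ some line = st.2.2 then st.2.1 + 1 else 1
  let best := if run > st.1 then run else st.1
  (best, run, some line)

-- B's loop invariant over the sorted list: after the processed prefix p, best is the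
-- maximal multiplicity of p, run is the multiplicity of prev = the last (hence maximal)
-- element of p.
theorem pv_loopB (l : List String) : ∀ (p : List String) (best run : Int) (prev : Option String),
    (p ++ l).Pairwise (· ≤ ·) →
    pvIsMaxCount p best →
    ((p = [] ∧ run = 0 ∧ prev = none) ∨
      (∃ x, prev = some x ∧ x ∈ p ∧ (∀ y ∈ p, y ≤ x) ∧ run = ((p.count x : Int)))) →
    pvIsMaxCount (p ++ l) (l.foldl pvStepB (best, run, prev)).1 := by
  induction l with
  | nil =>
      intro p best run prev _ h _
      simpa using h
  | cons x t ih =>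
      intro p best run prev hpw hmc hrun
      obtain ⟨H1, H2⟩ := hmc
      -- key fact: the new run value is the multiplicity of x in p ++ [x]
      have hxge : ∀ y ∈ p, y ≤ x := by
        intro y hy
        exact (List.pairwise_append.mp hpw).2.2 y hy x (by simp)
      have hrun' :
          (if run > 0 ∧ some x = prev then run + 1 else 1) = (((p ++ [x]).count x : Int)) := by
        rcases hrun with ⟨hp, hr, hv⟩ | ⟨x0, hv, hmem, hdom, hr⟩
        · subst hp; subst hr; subst hv
          simp
        · by_cases hx : x = x0
          · subst hx
            have h1 : 1 ≤ p.count x := List.one_le_count_iff.mpr hmem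
            have : run > 0 ∧ some x = prev := by
              constructor
              · rw [hr]; exact_mod_cast h1
              · rw [hv]
            rw [if_pos this, hr]
            simp [List.count_append]
          · have hnot : ¬ (run > 0 ∧ some x = prev) := by
              rintro ⟨_, he⟩
              rw [hv] at he
              exact hx (Option.some.injEq .. ▸ (by simpa using he))
            rw [if_neg hnot]
            -- x does not occur in p: any occurrence y = x has y ≤ x0 and x0 ≤ x
            have hnotin : x ∉ p := by
              intro hin
              have h1 : x ≤ x0 := hdom x hin
              have h2 : x0 ≤ x := hxge x0 hmem
              exact hx (le_antisymm h1 h2)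
            have : p.count x = 0 := List.count_eq_zero.mpr hnotin
            simp [List.count_append, this]
      set r' : Int := ((p ++ [x]).count x : Int) with hr'
      have hstep : pvStepB (best, run, prev) x
          = ((if r' > best then r' else best), r', some x) := by
        simp only [pvStepB, hrun']
      have H1' : ∀ k, (((p ++ [x]).count k : Int)) ≤ (if r' > best then r' else best) := by
        intro k
        by_cases hk : k = x
        · subst hk; split <;> omega
        · have hxk : ¬ x = k := fun h => hk h.symm
          have hck : ((p ++ [x]).count k) = p.count k := by
            simp [List.count_append, hxk]
          have := H1 k
          rw [hck]
          split <;> omega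
      have H2' : (if r' > best then r' else best) = 0
          ∨ ∃ k ∈ p ++ [x], (((p ++ [x]).count k : Int)) = (if r' > best then r' else best) := by
        split
        · exact Or.inr ⟨x, by simp, by rw [hr']⟩
        · rename_i hle
          rcases H2 with h0 | ⟨k, hk, hkc⟩
          · exfalso
            have h1 : (1 : Int) ≤ r' := by
              rw [hr']
              have : 1 ≤ (p ++ [x]).count x := List.one_le_count_iff.mpr (by simp)
              exact_mod_cast this
            omega
          · refine Or.inr ⟨k, by simp [hk], ?_⟩
            have hcN : (p ++ [x]).count x = p.count x + 1 := by simp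
            have hxk : ¬ x = k := by
              intro he
              rw [← he] at hkc
              rw [hr'] at hle
              omega
            have : ((p ++ [x]).count k) = p.count k := by
              simp [List.count_append, hxk]
            rw [this, hkc]
      have hinv' :
          (((p ++ [x]) = [] ∧ r' = 0 ∧ (some x : Option String) = none) ∨
            (∃ x0, (some x : Option String) = some x0 ∧ x0 ∈ p ++ [x] ∧
              (∀ y ∈ p ++ [x], y ≤ x0) ∧ r' = (((p ++ [x]).count x0 : Int)))) := by
        refine Or.inr ⟨x, rfl, by simp, ?_, by rw [hr']⟩
        intro y hy
        rcases List.mem_append.mp hy with h | h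
        · exact hxge y h
        · simp at h; exact le_of_eq h
      have hpw' : ((p ++ [x]) ++ t).Pairwise (· ≤ ·) := by
        simpa using hpw
      have := ih (p ++ [x]) (if r' > best then r' else best) r' (some x) hpw' ⟨H1', H2'⟩ hinv'
      rw [List.foldl_cons, hstep]
      simpa using this

-- ===== VERDICT (by name: the statement is the Claim_ definition above) =====
theorem TheAmazingFunction_spec : Claim_equal_TheAmazingFunction := by
  intro Grid _
  unfold Spec_TheAmazingFunction
  have hA : pvIsMaxCount Grid (TheAmazingFunction Grid) := by
    have h := pv_loopA Grid [] 0 ⟨by intro k; simp, Or.inl rfl⟩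
    simpa [TheAmazingFunction, pvStepA, PySem.Dict.counter] using h
  have hperm : (PySem.List.sorted Grid (fun x => x) false).Perm Grid :=
    PySem.List.sorted_perm ..
  have hB : pvIsMaxCount Grid (TheAmazingFunction_alt Grid) := by
    have hpw : ((PySem.List.sorted Grid (fun x => x) false)).Pairwise (· ≤ ·) :=
      PySem.List.sorted_pairwise ..
    have h := pv_loopB (PySem.List.sorted Grid (fun x => x) false) [] 0 0 none
      (by simpa using hpw) ⟨by intro k; simp, Or.inl rfl⟩ (Or.inl ⟨rfl, rfl, rfl⟩)
    simp only [List.nil_append] at h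
    obtain ⟨h1, h2⟩ := h
    constructor
    · intro k
      have := h1 k
      rwa [hperm.count_eq] at this
    · rcases h2 with h0 | ⟨k, hk, hkc⟩
      · exact Or.inl (by simpa [TheAmazingFunction_alt, pvStepB] using h0)
      · refine Or.inr ⟨k, hperm.mem_iff.mp hk, ?_⟩
        rw [← hperm.count_eq]
        simpa [TheAmazingFunction_alt, pvStepB] using hkc
  exact pv_maxCount_unique Grid _ _ hA hB
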